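-- pv_equiv track=rewrite | github.com/bdi2357/DirectIndexing | src/dates_matching.py | matching_d2
-- ===== SOURCE A (Python) =====
-- def matching_d2(rebalncing_dates,holdings_dates):
--     rd = [(x,'rd') for x in rebalncing_dates]
--     hd = [(x,'hd') for x in holdings_dates]
--     union = rd+hd
--     union.sort()
--     match_d = {}
--     for ii  in range(len(union)):
--         if union[ii][1] == 'rd':
--             jj = ii-1
--             while jj >=0:
--                 if union[jj][1] == 'hd':
--                     match_d[union[ii][0]] = union[jj][0]
--                     break;
--                 jj-=1
--     return match_d
-- ===== SOURCE B (Python) =====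
-- def matching_d2(rebalncing_dates, holdings_dates):
--     # One merge pass over the two sorted lists instead of a backward scan per entry.
--     hs = sorted(holdings_dates)
--     res = {}
--     j = 0
--     last = None
--     for r in sorted(rebalncing_dates):
--         while j < len(hs) and hs[j] <= r:
--             last = hs[j]
--             j += 1
--         if last is not None:
--             res[r] = last
--     return res
-- ===== Notes on version B (the rewrite author's own statement) =====
-- stated objective: faster
-- what changed: Replaced the per-entry backward scan over the sorted tagged union by a single two-pointer merge pass over the independently sorted holdings and rebalancing dates, tracking the last holdings date seen.
import Mathlib
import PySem

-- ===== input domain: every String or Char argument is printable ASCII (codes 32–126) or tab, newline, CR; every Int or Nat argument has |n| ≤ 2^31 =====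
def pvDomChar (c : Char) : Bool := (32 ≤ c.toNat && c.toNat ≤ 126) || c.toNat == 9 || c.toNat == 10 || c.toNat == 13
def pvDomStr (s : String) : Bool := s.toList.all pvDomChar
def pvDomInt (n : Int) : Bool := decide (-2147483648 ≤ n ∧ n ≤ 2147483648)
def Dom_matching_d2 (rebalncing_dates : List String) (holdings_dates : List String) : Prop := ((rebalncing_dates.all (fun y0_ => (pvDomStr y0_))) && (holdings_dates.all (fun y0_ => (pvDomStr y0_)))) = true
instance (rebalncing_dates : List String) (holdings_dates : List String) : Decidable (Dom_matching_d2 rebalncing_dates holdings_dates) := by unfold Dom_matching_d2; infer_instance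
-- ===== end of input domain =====

-- B replaces A's quadratic backward scan per rebalancing entry in the sorted union by one
-- two-pointer merge pass over the two independently sorted lists (measured objective: faster).

-- ===== PORT A =====
-- the inner `while jj >= 0: …` loop: scans backwards from index jj for the nearest 'hd' entry,
-- returning the date it would assign (the outer code performs the dict assignment on break)
def pvWhileA (union : List (String × String)) (jj : Int) : Option String :=
  if _h : 0 ≤ jj then
    if (PySem.List.pyGetD union jj ("", "")).2 == "hd" then
      some (PySem.List.pyGetD union jj ("", "")).1
    else pvWhileA union (jj - 1)
  else none
termination_by (jj + 1).toNat
decreasing_by omega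

-- the body of A's `for ii in range(len(union))` loop
def pvStepA (union : List (String × String)) (d : PySem.Dict String String) (ii : Int) :
    PySem.Dict String String :=
  if (PySem.List.pyGetD union ii ("", "")).2 == "rd" then
    match pvWhileA union (ii - 1) with
    | some h => d.insert (PySem.List.pyGetD union ii ("", "")).1 h
    | none => d
  else d

def matching_d2 (rebalncing_dates : List String) (holdings_dates : List String) :
    List (String × String) :=
  let rd := rebalncing_dates.map (fun x => (x, "rd"))
  let hd := holdings_dates.map (fun x => (x, "hd"))
  let union := PySem.List.sorted2 (rd ++ hd) Prod.fst Prod.snd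
  let match_d := (PySem.List.pyRange 0 (union.length : Int) 1).foldl (pvStepA union)
    PySem.Dict.empty
  match_d.items

-- ===== PORT B =====
-- Source B's `for r in sorted(rebalncing_dates)` with the inner `while j < len(hs) and hs[j] <= r`
-- pointer loop; the index j into hs is represented by the not-yet-consumed suffix of hs
-- `if last is not None: res[r] = last`
def pvUpd : Option String → String → PySem.Dict String String → PySem.Dict String String
  | some l, r, res => res.insert r l
  | none, _, res => res

def pvGoB (hs : List String) (rs : List String) (last : Option String)
    (res : PySem.Dict String String) : PySem.Dict String String :=
  match hs, rs with
  | _, [] => res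
  | h :: ht, r :: rt =>
    if h ≤ r then pvGoB ht (r :: rt) (some h) res
    else pvGoB (h :: ht) rt last (pvUpd last r res)
  | [], r :: rt => pvGoB [] rt last (pvUpd last r res)
termination_by hs.length + rs.length
decreasing_by all_goals (simp only [List.length_cons]; omega)

def matching_d2_alt (rebalncing_dates : List String) (holdings_dates : List String) :
    List (String × String) :=
  let hs := PySem.List.sorted holdings_dates (fun x => x)
  (pvGoB hs (PySem.List.sorted rebalncing_dates (fun x => x)) none PySem.Dict.empty).items

-- ===== PRECONDITION & SPEC =====
def Spec_matching_d2 (rebalncing_dates : List String) (holdings_dates : List String) (out : List (String × String)) : Prop := out = matching_d2_alt rebalncing_dates holdings_dates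
instance (rebalncing_dates : List String) (holdings_dates : List String) (out : List (String × String)) : Decidable (Spec_matching_d2 rebalncing_dates holdings_dates out) := by unfold Spec_matching_d2; infer_instance

-- ===== CLAIM (what is proved, stated in full; the proofs are below) =====
def Claim_equal_matching_d2 : Prop := ∀ (rebalncing_dates : List String) (holdings_dates : List String), Dom_matching_d2 rebalncing_dates holdings_dates → Spec_matching_d2 rebalncing_dates holdings_dates (matching_d2 rebalncing_dates holdings_dates)

-- ===== LEMMAS AND PROOFS =====

-- the last 'hd'-tagged date of a list of tagged entries
def pvLastHd (xs : List (String × String)) : Option String :=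
  ((xs.filter (fun p => p.2 == "hd")).getLast?).map Prod.fst

-- the single forward pass A's loop nest amounts to: carry the last 'hd' date seen
def pvPass2 : List (String × String) → Option String → PySem.Dict String String →
    PySem.Dict String String
  | [], _, d => d
  | p :: t, last, d =>
    pvPass2 t (if p.2 == "hd" then some p.1 else last)
      (if p.2 == "rd" then pvUpd last p.1 d else d)

-- the explicit merge of the sorted rebalancing and holdings lists that `union.sort()` produces
def pvMergeT (rs : List String) (hs : List String) : List (String × String) :=
  match rs, hs with
  | [], hs => hs.map (fun x => (x, "hd"))
  | r :: rt, [] => (r :: rt).map (fun x => (x, "rd"))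
  | r :: rt, h :: ht =>
    if h ≤ r then (h, "hd") :: pvMergeT (r :: rt) ht
    else (r, "rd") :: pvMergeT rt (h :: ht)
termination_by rs.length + hs.length
decreasing_by all_goals (simp only [List.length_cons]; omega)

-- Python's tuple-< on (date, tag), exactly the Bool comparison sorted2 uses
def pvLtb (a b : String × String) : Bool :=
  decide (a.1 < b.1) || (!decide (b.1 < a.1) && decide (a.2 < b.2))

theorem pvLtb_true_iff (x y : String × String) :
    pvLtb x y = true ↔
      (x.1.toList < y.1.toList ∨ (x.1.toList ≤ y.1.toList ∧ x.2.toList < y.2.toList)) := by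
  simp [pvLtb]

theorem pvLtb_false_iff (x y : String × String) :
    pvLtb x y = false ↔
      (y.1.toList ≤ x.1.toList ∧ (x.1.toList ≤ y.1.toList → y.2.toList ≤ x.2.toList)) := by
  simp [pvLtb]

theorem pvLtb_asymm (a b : String × String) (h : pvLtb a b = true) : pvLtb b a = false := by
  rw [pvLtb_true_iff] at h
  rw [pvLtb_false_iff]
  rcases h with h | ⟨h1, h2⟩
  · exact ⟨h.le, fun hba => absurd hba h.not_ge⟩
  · exact ⟨h1, fun _ => h2.le⟩

theorem pvLtb_trans_neg (a b c : String × String) (h1 : pvLtb a b = true)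
    (h2 : pvLtb c b = false) : pvLtb c a = false := by
  rw [pvLtb_true_iff] at h1
  rw [pvLtb_false_iff] at h2 ⊢
  obtain ⟨h21, h22⟩ := h2
  rcases h1 with h1 | ⟨h11, h12⟩
  · exact ⟨(h1.trans_le h21).le, fun hca => absurd hca (h1.trans_le h21).not_ge⟩
  · exact ⟨h11.trans h21, fun hca => (h12.trans_le (h22 (hca.trans h11))).le⟩

theorem pv_insertBy_pairwise (x : String × String) (l : List (String × String))
    (hl : l.Pairwise (fun a b => pvLtb b a = false)) :
    (PySem.List.insertBy pvLtb x l).Pairwise (fun a b => pvLtb b a = false) := by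
  induction l with
  | nil =>
    rw [show PySem.List.insertBy pvLtb x [] = [x] from rfl]
    exact List.pairwise_singleton _ _
  | cons y ys ih =>
    rw [show PySem.List.insertBy pvLtb x (y :: ys)
        = if pvLtb x y = true then x :: y :: ys else y :: PySem.List.insertBy pvLtb x ys
        from rfl]
    by_cases hxy : pvLtb x y = true
    · rw [if_pos hxy]
      refine List.Pairwise.cons ?_ hl
      intro z hz
      rcases List.mem_cons.mp hz with rfl | hz
      · exact pvLtb_asymm x z hxy
      · exact pvLtb_trans_neg x y z hxy ((List.pairwise_cons.mp hl).1 z hz)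
    · rw [if_neg hxy]
      refine List.Pairwise.cons ?_ (ih (List.pairwise_cons.mp hl).2)
      intro z hz
      rcases (PySem.List.mem_insertBy _ _ _ _).mp hz with rfl | hz
      · exact eq_false_of_ne_true hxy
      · exact (List.pairwise_cons.mp hl).1 z hz

theorem pv_sorted2_pairwise (xs : List (String × String)) :
    (PySem.List.sorted2 xs Prod.fst Prod.snd).Pairwise (fun a b => pvLtb b a = false) := by
  rw [show PySem.List.sorted2 xs Prod.fst Prod.snd
      = xs.foldl (fun acc x => PySem.List.insertBy pvLtb x acc) [] from rfl]
  have main : ∀ (l : List (String × String)) (acc : List (String × String)),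
      acc.Pairwise (fun a b => pvLtb b a = false) →
      (l.foldl (fun acc x => PySem.List.insertBy pvLtb x acc) acc).Pairwise
        (fun a b => pvLtb b a = false) := by
    intro l
    induction l with
    | nil => intro acc h; exact h
    | cons z zs ih =>
      intro acc h
      exact ih _ (pv_insertBy_pairwise z acc h)
  exact main xs [] (List.Pairwise.nil)

theorem pvMergeT_perm (rs hs : List String) :
    (pvMergeT rs hs).Perm (rs.map (fun x => (x, "rd")) ++ hs.map (fun x => (x, "hd"))) := by
  induction rs, hs using pvMergeT.induct with
  | case1 hs => simp [pvMergeT]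
  | case2 r rt => simp [pvMergeT]
  | case3 r rt h ht hle ih =>
    rw [pvMergeT, if_pos hle]
    exact (ih.cons _).trans (List.perm_middle.symm)
  | case4 r rt h ht hle ih =>
    rw [pvMergeT, if_neg hle]
    simpa using ih.cons (r, "rd")

theorem pv_mem_mergeT (rs hs : List String) (w : String × String)
    (hw : w ∈ pvMergeT rs hs) :
    (∃ x ∈ rs, w = (x, "rd")) ∨ (∃ x ∈ hs, w = (x, "hd")) := by
  have := (pvMergeT_perm rs hs).subset hw
  rcases List.mem_append.mp this with h | h
  · obtain ⟨x, hx, rfl⟩ := List.mem_map.mp h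
    exact Or.inl ⟨x, hx, rfl⟩
  · obtain ⟨x, hx, rfl⟩ := List.mem_map.mp h
    exact Or.inr ⟨x, hx, rfl⟩

theorem pv_str_le_toList {a b : String} (h : a ≤ b) : a.toList ≤ b.toList := by
  simpa using h

theorem pvMergeT_pairwise (rs hs : List String)
    (hr : rs.Pairwise (· ≤ ·)) (hh : hs.Pairwise (· ≤ ·)) :
    (pvMergeT rs hs).Pairwise (fun a b => pvLtb b a = false) := by
  induction rs, hs using pvMergeT.induct with
  | case1 hs =>
    rw [pvMergeT]
    refine List.pairwise_map.mpr (hh.imp ?_)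
    intro a b hab
    rw [pvLtb_false_iff]
    exact ⟨pv_str_le_toList hab, fun _ => le_refl _⟩
  | case2 r rt =>
    rw [pvMergeT]
    refine List.pairwise_map.mpr (hr.imp ?_)
    intro a b hab
    rw [pvLtb_false_iff]
    exact ⟨pv_str_le_toList hab, fun _ => le_refl _⟩
  | case3 r rt h ht hle ih =>
    rw [pvMergeT, if_pos hle]
    refine List.Pairwise.cons ?_ (ih hr (List.pairwise_cons.mp hh).2)
    intro w hw
    rcases pv_mem_mergeT _ _ _ hw with ⟨x, hx, rfl⟩ | ⟨x, hx, rfl⟩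
    · -- w = (x, "rd"), x ∈ r :: rt, and h ≤ r ≤ x
      have hrx : h ≤ x := by
        rcases List.mem_cons.mp hx with rfl | hx
        · exact hle
        · exact hle.trans ((List.pairwise_cons.mp hr).1 x hx)
      rw [pvLtb_false_iff]
      exact ⟨pv_str_le_toList hrx,
        fun _ => (by decide : ("hd" : String).toList ≤ ("rd" : String).toList)⟩
    · -- w = (x, "hd"), x ∈ ht, and h ≤ x
      have hhx : h ≤ x := (List.pairwise_cons.mp hh).1 x hx
      rw [pvLtb_false_iff]
      exact ⟨pv_str_le_toList hhx, fun _ => le_refl _⟩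
  | case4 r rt h ht hle ih =>
    rw [pvMergeT, if_neg hle]
    have hrh : r.toList < h.toList := by
      have : r < h := lt_of_not_ge hle
      simpa using this
    refine List.Pairwise.cons ?_ (ih (List.pairwise_cons.mp hr).2 hh)
    intro w hw
    rcases pv_mem_mergeT _ _ _ hw with ⟨x, hx, rfl⟩ | ⟨x, hx, rfl⟩
    · have hrx : r ≤ x := (List.pairwise_cons.mp hr).1 x hx
      rw [pvLtb_false_iff]
      exact ⟨pv_str_le_toList hrx, fun _ => le_refl _⟩
    · have hhx : h ≤ x := by
        rcases List.mem_cons.mp hx with rfl | hx'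
        · exact le_refl x
        · exact (List.pairwise_cons.mp hh).1 x hx'
      have hrx : r.toList < x.toList := lt_of_lt_of_le hrh (pv_str_le_toList hhx)
      rw [pvLtb_false_iff]
      exact ⟨hrx.le, fun hxr => absurd hxr hrx.not_ge⟩

-- the sorted union IS the merge of the two sorted halves
theorem pv_union_eq_merge (rds hds : List String) :
    PySem.List.sorted2 (rds.map (fun x => (x, "rd")) ++ hds.map (fun x => (x, "hd")))
        Prod.fst Prod.snd
      = pvMergeT (PySem.List.sorted rds (fun x => x)) (PySem.List.sorted hds (fun x => x)) := by
  refine List.Perm.eq_of_pairwise ?_ (pv_sorted2_pairwise _)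
      (pvMergeT_pairwise _ _ ?_ ?_) ?_
  · intro a b _ _ h1 h2
    rw [pvLtb_false_iff] at h1 h2
    have e1 : a.1.toList = b.1.toList := le_antisymm h1.1 h2.1
    have e2 : a.2.toList = b.2.toList := le_antisymm (h1.2 e1.ge) (h2.2 e1.le)
    have : a.1 = b.1 := String.toList_inj.mp e1
    have : a.2 = b.2 := String.toList_inj.mp e2
    exact Prod.ext ‹a.1 = b.1› ‹a.2 = b.2›
  · simpa using PySem.List.sorted_pairwise rds (fun x => x)
  · simpa using PySem.List.sorted_pairwise hds (fun x => x)
  · refine (PySem.List.sorted2_perm _ _ _ _).trans (List.Perm.trans ?_ (pvMergeT_perm _ _).symm)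
    exact ((PySem.List.sorted_perm rds (fun x => x) false).map _).symm.append
      ((PySem.List.sorted_perm hds (fun x => x) false).map _).symm

theorem pvLastHd_concat (xs : List (String × String)) (p : String × String) :
    pvLastHd (xs ++ [p]) = if p.2 == "hd" then some p.1 else pvLastHd xs := by
  by_cases h : p.2 == "hd"
  · simp [pvLastHd, List.filter_append, h]
  · simp [pvLastHd, List.filter_append, h]

theorem pvWhileA_eq (U : List (String × String)) (n : Nat) (hn : n ≤ U.length) :
    pvWhileA U ((n : Int) - 1) = pvLastHd (U.take n) := by
  induction n with
  | zero =>
    rw [pvWhileA]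
    norm_num [pvLastHd]
  | succ m ih =>
    have hm : m < U.length := hn
    have hcast : ((m + 1 : Nat) : Int) - 1 = (m : Nat) := by push_cast; ring
    rw [hcast, pvWhileA]
    rw [dif_pos (by positivity)]
    rw [PySem.List.pyGetD_natCast, List.getD_eq_getElem _ _ hm]
    have htake : U.take (m + 1) = U.take m ++ [U[m]] := by
      rw [List.take_add_one, List.getElem?_eq_getElem hm]
      rfl
    rw [htake, pvLastHd_concat]
    by_cases htag : U[m].2 == "hd"
    · rw [if_pos htag, if_pos htag]
    · rw [if_neg htag, if_neg htag]
      exact ih (le_of_lt hm)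

theorem pv_foldA_eq (U : List (String × String)) (k : Nat) (hk : k ≤ U.length)
    (d : PySem.Dict String String) :
    (PySem.List.pyRange (k : Int) (U.length : Int) 1).foldl (pvStepA U) d
      = pvPass2 (U.drop k) (pvLastHd (U.take k)) d := by
  generalize hgen : U.length - k = n
  induction n generalizing k d with
  | zero =>
    have hke : k = U.length := by omega
    subst hke
    rw [PySem.List.pyRange_one_eq_nil (le_refl _)]
    simp [pvPass2]
  | succ m ih =>
    have hklt : k < U.length := by omega
    rw [PySem.List.pyRange_one_cons (by exact_mod_cast hklt)]
    rw [List.foldl_cons]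
    have hstep : pvStepA U d (k : Int)
        = (if U[k].2 == "rd" then pvUpd (pvLastHd (U.take k)) U[k].1 d else d) := by
      rw [pvStepA, PySem.List.pyGetD_natCast, List.getD_eq_getElem _ _ hklt]
      rw [pvWhileA_eq U k (le_of_lt hklt)]
      cases pvLastHd (U.take k) <;> simp [pvUpd]
    have hcast1 : (k : Int) + 1 = ((k + 1 : Nat) : Int) := by push_cast; ring
    rw [hstep, hcast1, ih (k + 1) (by omega) _ (by omega)]
    rw [List.drop_eq_getElem_cons hklt]
    have htake : U.take (k + 1) = U.take k ++ [U[k]] := by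
      rw [List.take_add_one, List.getElem?_eq_getElem hklt]
      rfl
    rw [htake, pvLastHd_concat]
    rw [pvPass2]

theorem pv_tag_hdhd : (("hd" : String) == "hd") = true := by decide
theorem pv_tag_hdrd : (("hd" : String) == "rd") = false := by decide
theorem pv_tag_rdhd : (("rd" : String) == "hd") = false := by decide
theorem pv_tag_rdrd : (("rd" : String) == "rd") = true := by decide

theorem pv_pass2_hd (hs : List String) (last : Option String) (d : PySem.Dict String String) :
    pvPass2 (hs.map (fun x => (x, "hd"))) last d = d := by
  induction hs generalizing last with
  | nil => rw [List.map_nil, pvPass2]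
  | cons h ht ih =>
    rw [List.map_cons, pvPass2]
    rw [if_pos pv_tag_hdhd, if_neg (ne_true_of_eq_false pv_tag_hdrd)]
    exact ih _

theorem pv_pass2_rd (rs : List String) (last : Option String) (d : PySem.Dict String String) :
    pvPass2 (rs.map (fun x => (x, "rd"))) last d = pvGoB [] rs last d := by
  induction rs generalizing d with
  | nil => rw [List.map_nil, pvPass2, pvGoB]
  | cons r rt ih =>
    rw [List.map_cons, pvPass2, pvGoB]
    rw [if_neg (ne_true_of_eq_false pv_tag_rdhd), if_pos pv_tag_rdrd]
    exact ih _

theorem pvPass2_merge_eq_goB (rs hs : List String) (last : Option String)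
    (d : PySem.Dict String String) :
    pvPass2 (pvMergeT rs hs) last d = pvGoB hs rs last d := by
  induction rs, hs using pvMergeT.induct generalizing last d with
  | case1 hs =>
    rw [pvMergeT, pv_pass2_hd, pvGoB]
  | case2 r rt =>
    rw [pvMergeT, pv_pass2_rd]
  | case3 r rt h ht hle ih =>
    rw [pvMergeT, if_pos hle, pvPass2]
    rw [if_pos pv_tag_hdhd, if_neg (ne_true_of_eq_false pv_tag_hdrd)]
    rw [pvGoB, if_pos hle]
    exact ih _ _
  | case4 r rt h ht hle ih =>
    rw [pvMergeT, if_neg hle, pvPass2]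
    rw [if_neg (ne_true_of_eq_false pv_tag_rdhd), if_pos pv_tag_rdrd]
    rw [pvGoB, if_neg hle]
    exact ih _ _

-- ===== VERDICT (by name: the statement is the Claim_ definition above) =====
theorem matching_d2_spec : Claim_equal_matching_d2 := by
  intro rds hds _
  unfold Spec_matching_d2 matching_d2 matching_d2_alt
  simp only []
  have h0 := pv_foldA_eq
    (PySem.List.sorted2 (rds.map (fun x => (x, "rd")) ++ hds.map (fun x => (x, "hd")))
      Prod.fst Prod.snd) 0 (Nat.zero_le _) PySem.Dict.empty
  simp only [Nat.cast_zero, List.drop_zero, List.take_zero] at h0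
  rw [h0, pv_union_eq_merge]
  rw [show pvLastHd [] = none from rfl]
  rw [pvPass2_merge_eq_goB]
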